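-- pv_equiv track=rewrite | github.com/kimotot/pe | py20.py | list_kake
-- ===== SOURCE A (Python) =====
-- def list_kake(lista,n):
-- 	listans = list(lista)
-- 	for i in range(len(listans)):
-- 		listans[i] = listans[i] * n
--
-- 	i = 0
-- 	while i < len(listans):
-- 		t = listans[i] // 10
-- 		listans[i] = listans[i] % 10
--
-- 		if t > 0:
-- 			if i == len(listans) - 1:
-- 				listans.append(t)
-- 			else:
-- 				listans[i+1] += t
--
-- 		i += 1
--
--
-- 	return listans
-- ===== SOURCE B (Python) =====
-- def list_kake(lista, n):
--     out = []
--     carry = 0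
--     for d in lista:
--         carry, digit = divmod(d * n + carry, 10)
--         out.append(digit)
--     while carry > 0:
--         out.append(carry % 10)
--         carry //= 10
--     return out
-- ===== Notes on version B (the rewrite author's own statement) =====
-- stated objective: simpler
-- what changed: Replaces A's two passes over a mutated copy (multiply every cell, then an index/while carry pass that may grow the list) with a single forward pass threading a carry accumulator plus a final carry-drain loop; Pre_ admits every list of at most one cell and, for longer lists, the inputs where every cell-times-multiplier product is nonnegative (so no negative carry arises), and excludes the off-domain inputs where a negative carry reaches a later cell, which A silently drops while B propagates it, neither value being one a caller specifies.
-- outside the precondition, e.g. on list_kake([-5, 3], 2): A returns [0, 6], B returns [0, 5]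
import Mathlib
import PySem

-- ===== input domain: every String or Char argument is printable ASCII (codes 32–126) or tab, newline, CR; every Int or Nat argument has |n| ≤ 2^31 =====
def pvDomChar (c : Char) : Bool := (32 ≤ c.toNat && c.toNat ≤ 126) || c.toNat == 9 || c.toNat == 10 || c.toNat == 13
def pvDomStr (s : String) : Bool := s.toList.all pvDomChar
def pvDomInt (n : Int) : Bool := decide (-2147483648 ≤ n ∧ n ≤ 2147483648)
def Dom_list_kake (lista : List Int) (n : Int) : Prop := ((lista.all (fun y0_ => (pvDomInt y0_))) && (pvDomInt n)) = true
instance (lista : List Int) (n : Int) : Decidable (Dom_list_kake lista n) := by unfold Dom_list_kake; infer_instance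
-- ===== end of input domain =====

-- B replaces A's two passes (multiply-all, then an index/while carry pass that may grow the list)
-- by a single forward pass threading a carry accumulator plus a final carry-drain loop ('simpler');
-- on the natural domain (nonnegative entries and multiplier) stated by Pre_.

-- ===== PORT A =====
-- A's while loop over the (possibly growing) list, as recursion on the unprocessed suffix:
-- at element v, t = v // 10 and the cell becomes v % 10; a positive t is added to the next
-- cell, or appended when v is last (the appended cell is processed next).
def list_kake_loopA : List Int → List Int
  | [] => []
  | v :: rest =>
    let t := PySem.Int.floordiv v 10
    let h := PySem.Int.mod v 10
    if 0 < t then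
      match rest with
      | [] => h :: list_kake_loopA [t]
      | r :: rs => h :: list_kake_loopA ((r + t) :: rs)
    else
      h :: list_kake_loopA rest
termination_by l => (l.length, (l.headD 0).toNat)
decreasing_by
  · -- last element, append t: same length 1, head value drops from v to t
    have hmul : t * 10 ≤ v :=
      (PySem.Int.le_floordiv_iff_mul_le (by omega)).mp le_rfl
    simp only [List.length, List.headD]
    right
    omega
  · left; simp
  · left; simp

-- first pass: listans[i] = listans[i] * n for every i
def list_kake (lista : List Int) (n : Int) : List Int :=
  list_kake_loopA (lista.map (fun x => x * n))

-- ===== PORT B =====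
-- while carry > 0: append carry % 10; carry //= 10
def list_kake_drain (carry : Int) : List Int :=
  if 0 < carry then
    PySem.Int.mod carry 10 :: list_kake_drain (PySem.Int.floordiv carry 10)
  else []
termination_by carry.toNat
decreasing_by
  have hlt : PySem.Int.floordiv carry 10 < carry :=
    (PySem.Int.floordiv_lt_iff_lt_mul (by omega)).mpr (by omega)
  omega

-- the single forward pass: carry, digit = divmod(d*n + carry, 10); emit digit
def list_kake_go (xs : List Int) (n : Int) (carry : Int) : List Int :=
  match xs with
  | [] => list_kake_drain carry
  | d :: rest =>
    let cur := d * n + carry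
    PySem.Int.mod cur 10 :: list_kake_go rest n (PySem.Int.floordiv cur 10)

def list_kake_alt (lista : List Int) (n : Int) : List Int :=
  list_kake_go lista n 0

-- ===== PRECONDITION & SPEC =====
-- Pre_ admits every list of at most one cell (no carry ever crosses a cell boundary there) and, for
-- longer lists, the inputs where every cell-times-multiplier product is nonnegative, so no negative
-- carry can arise. Excluded are the inputs outside the digit-list domain where a negative carry
-- reaches a later cell: A drops it, B propagates it, and neither value is one a caller specifies.
def Pre_list_kake (lista : List Int) (n : Int) : Prop :=
  lista.length ≤ 1 ∨ ∀ x ∈ lista, 0 ≤ x * n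
instance (lista : List Int) (n : Int) : Decidable (Pre_list_kake lista n) := by
  unfold Pre_list_kake; infer_instance

def pvWitness_list_kake : List Int × Int := ([7, 1, 9, 2], 13)

def Spec_list_kake (lista : List Int) (n : Int) (out : List Int) : Prop := out = list_kake_alt lista n
instance (lista : List Int) (n : Int) (out : List Int) : Decidable (Spec_list_kake lista n out) := by unfold Spec_list_kake; infer_instance

-- ===== CLAIM (what is proved, stated in full; the proofs are below) =====
def Claim_equal_list_kake : Prop := ∀ (lista : List Int) (n : Int), Dom_list_kake lista n → Pre_list_kake lista n → Spec_list_kake lista n (list_kake lista n)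

-- ===== LEMMAS AND PROOFS =====

theorem loopA_nil : list_kake_loopA [] = [] := by
  rw [list_kake_loopA]

theorem loopA_one (v : Int) :
    list_kake_loopA [v] =
      (if 0 < PySem.Int.floordiv v 10 then
         PySem.Int.mod v 10 :: list_kake_loopA [PySem.Int.floordiv v 10]
       else PySem.Int.mod v 10 :: list_kake_loopA []) := by
  conv_lhs => rw [list_kake_loopA.eq_def]

theorem loopA_cons2 (v r : Int) (rs : List Int) :
    list_kake_loopA (v :: r :: rs) =
      (if 0 < PySem.Int.floordiv v 10 then
         PySem.Int.mod v 10 :: list_kake_loopA ((r + PySem.Int.floordiv v 10) :: rs)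
       else PySem.Int.mod v 10 :: list_kake_loopA (r :: rs)) := by
  conv_lhs => rw [list_kake_loopA.eq_def]

-- A's loop on a singleton positive cell is exactly B's drain loop.
theorem loopA_singleton_eq_drain (c : Int) (hc : 0 < c) :
    list_kake_loopA [c] = list_kake_drain c := by
  rw [loopA_one, list_kake_drain]
  simp only [hc, if_true]
  by_cases ht : 0 < PySem.Int.floordiv c 10
  · simp only [ht, if_true]
    exact congrArg _ (loopA_singleton_eq_drain _ ht)
  · simp only [ht, if_false]
    rw [loopA_nil, list_kake_drain, if_neg ht]
termination_by c.toNat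
decreasing_by
  have hmul : PySem.Int.floordiv c 10 * 10 ≤ c :=
    (PySem.Int.le_floordiv_iff_mul_le (by omega)).mp le_rfl
  omega

-- the state A's loop sees when entering the remaining suffix xs with pending carry c:
-- the carry was already added into the head cell (or appended when none remains)
def loopAState (xs : List Int) (n : Int) (c : Int) : List Int :=
  match xs with
  | [] => if 0 < c then [c] else []
  | x :: rest => (x * n + c) :: rest.map (fun y => y * n)

theorem loopAState_zero (xs : List Int) (n : Int) :
    loopAState xs n 0 = xs.map (fun y => y * n) := by
  cases xs with
  | nil => simp [loopAState]
  | cons x rest => simp [loopAState]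

-- main invariant on the natural domain: A's loop from that state equals B's pass with carry c
theorem loopA_eq_go (xs : List Int) (n : Int) (c : Int)
    (hx : ∀ x ∈ xs, 0 ≤ x * n) (hc : 0 ≤ c) :
    list_kake_loopA (loopAState xs n c) = list_kake_go xs n c := by
  induction xs generalizing c with
  | nil =>
    by_cases h : 0 < c
    · simpa [loopAState, h, list_kake_go] using loopA_singleton_eq_drain c h
    · have : c = 0 := by omega
      subst this
      simp [loopAState, list_kake_go, list_kake_drain, loopA_nil]
  | cons x rest ih =>
    have hx0 : 0 ≤ x * n := hx x (by simp)
    have hrest : ∀ y ∈ rest, 0 ≤ y * n := fun y hy => hx y (by simp [hy])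
    simp only [loopAState, list_kake_go]
    set v := x * n + c with hv
    have hv0 : 0 ≤ v := by omega
    set t := PySem.Int.floordiv v 10 with htdef
    have ht0 : 0 ≤ t :=
      (PySem.Int.le_floordiv_iff_mul_le (b := 10) (by omega)).mpr (by omega)
    cases rest with
    | nil =>
      rw [List.map_nil, loopA_one, ← htdef]
      by_cases ht : 0 < t
      · simp only [ht, if_true]
        have h1 : [t] = loopAState [] n t := by simp [loopAState, ht]
        rw [h1, ih t (fun y hy => absurd hy (List.not_mem_nil)) ht0]
      · simp only [ht, if_false]
        have : t = 0 := by omega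
        rw [loopA_nil, this]
        simp [list_kake_go, list_kake_drain]
    | cons r rs =>
      rw [List.map_cons, loopA_cons2, ← htdef]
      by_cases ht : 0 < t
      · simp only [ht, if_true]
        have h1 : (r * n + t) :: rs.map (fun y => y * n) = loopAState (r :: rs) n t := by
          simp [loopAState]
        rw [h1, ih t hrest ht0]
      · simp only [ht, if_false]
        have h0 : t = 0 := by omega
        rw [h0, ← ih 0 hrest le_rfl, loopAState_zero (r :: rs) n, List.map_cons]

-- on a single cell A's loop is one digit followed by the drain of its own carry, any sign
theorem loopA_single (v : Int) :
    list_kake_loopA [v] = PySem.Int.mod v 10 :: list_kake_drain (PySem.Int.floordiv v 10) := by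
  rw [loopA_one]
  by_cases ht : 0 < PySem.Int.floordiv v 10
  · rw [if_pos ht, loopA_singleton_eq_drain _ ht]
  · rw [if_neg ht, loopA_nil, list_kake_drain, if_neg ht]

-- ===== VERDICT (by name: the statement is the Claim_ definition above) =====
theorem list_kake_spec : Claim_equal_list_kake := by
  intro lista n _ hpre
  unfold Spec_list_kake list_kake list_kake_alt
  rcases hpre with hlen | hx
  · match lista, hlen with
    | [], _ => rw [List.map_nil, loopA_nil]; simp [list_kake_go, list_kake_drain]
    | [x], _ =>
      rw [List.map_cons, List.map_nil, loopA_single]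
      show _ = PySem.Int.mod (x * n + 0) 10 :: list_kake_drain (PySem.Int.floordiv (x * n + 0) 10)
      rw [add_zero]
  · rw [← loopAState_zero lista n, loopA_eq_go lista n 0 hx le_rfl]
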